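-- pv_equiv track=rewrite | github.com/imehtn/TIP_102 | Unit1/v2_advancedproblems.py | local_maximums
-- ===== SOURCE A (Python) =====
-- def local_maximums(grid):
--     n = len(grid)
--     local_maxes = []
--
--     for i in range(1, n - 1):
--         row = []
--         for j in range(1, n - 1):
--             max_value = max(
--                 grid[i-1][j-1], grid[i-1][j], grid[i-1][j+1],
--                 grid[i][j-1], grid[i][j], grid[i][j+1],
--                 grid[i+1][j-1], grid[i+1][j], grid[i+1][j+1]
--             )
--             row.append(max_value)
--         local_maxes.append(row)
--
--     return local_maxes
-- ===== SOURCE B (Python) =====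
-- def local_maximums(grid):
--     n = len(grid)
--     # separable 3x3 max filter: row-wise 3-max, then column-wise 3-max
--     horiz = [[max(grid[i][j - 1], grid[i][j], grid[i][j + 1])
--               for j in range(1, n - 1)] for i in range(n)]
--     return [[max(horiz[i - 1][j - 1], horiz[i][j - 1], horiz[i + 1][j - 1])
--              for j in range(1, n - 1)] for i in range(1, n - 1)]
-- ===== Notes on version B (the rewrite author's own statement) =====
-- stated objective: alternative
-- what changed: Replaces the 9-way max per cell by a separable filter: a precomputed table of row-wise 3-element maxima, then a 3-way max over that table per output cell.
import Mathlib
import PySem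

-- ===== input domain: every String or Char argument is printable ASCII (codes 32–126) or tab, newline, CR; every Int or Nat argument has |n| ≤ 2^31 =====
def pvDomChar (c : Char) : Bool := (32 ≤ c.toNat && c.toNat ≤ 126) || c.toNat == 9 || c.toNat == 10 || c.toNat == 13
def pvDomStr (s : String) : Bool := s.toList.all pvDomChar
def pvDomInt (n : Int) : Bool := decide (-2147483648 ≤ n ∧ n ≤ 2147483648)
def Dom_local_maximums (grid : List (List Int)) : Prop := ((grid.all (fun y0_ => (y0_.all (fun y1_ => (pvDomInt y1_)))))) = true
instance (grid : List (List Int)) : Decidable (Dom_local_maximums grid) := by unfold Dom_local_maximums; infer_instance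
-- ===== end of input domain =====

-- B computes the same 3x3-window maxima as a separable filter (row-wise 3-max table, then
-- column-wise 3-max); an alternative decomposition, no speed claim.

-- shared indexing helper: grid[i][j] (in range under Pre_; default only makes the port total)
def pvCell (grid : List (List Int)) (i j : Int) : Int :=
  PySem.List.pyGetD (PySem.List.pyGetD grid i []) j 0

-- ===== PORT A =====
def local_maximums (grid : List (List Int)) : List (List Int) :=
  (PySem.List.pyRange 1 ((grid.length : Int) - 1) 1).map (fun i =>
    (PySem.List.pyRange 1 ((grid.length : Int) - 1) 1).map (fun j =>
      max (max (max (max (max (max (max (max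
        (pvCell grid (i-1) (j-1)) (pvCell grid (i-1) j)) (pvCell grid (i-1) (j+1)))
        (pvCell grid i (j-1))) (pvCell grid i j)) (pvCell grid i (j+1)))
        (pvCell grid (i+1) (j-1))) (pvCell grid (i+1) j)) (pvCell grid (i+1) (j+1))))

-- ===== PORT B =====
def pvMax3 (a b c : Int) : Int := max (max a b) c

-- intermediate table of row-wise 3-maxes (Source B's variable 'horiz')
def pvHoriz (grid : List (List Int)) : List (List Int) :=
  (PySem.List.pyRange 0 (grid.length : Int) 1).map (fun i =>
    (PySem.List.pyRange 1 ((grid.length : Int) - 1) 1).map (fun j =>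
      pvMax3 (pvCell grid i (j-1)) (pvCell grid i j) (pvCell grid i (j+1))))

def local_maximums_alt (grid : List (List Int)) : List (List Int) :=
  (PySem.List.pyRange 1 ((grid.length : Int) - 1) 1).map (fun i =>
    (PySem.List.pyRange 1 ((grid.length : Int) - 1) 1).map (fun j =>
      pvMax3 (pvCell (pvHoriz grid) (i-1) (j-1)) (pvCell (pvHoriz grid) i (j-1)) (pvCell (pvHoriz grid) (i+1) (j-1))))

-- ===== PRECONDITION & SPEC =====
-- Pre_ excludes exactly the ragged grids on which Python A raises IndexError: when there are
-- at least 3 rows, every row must have at least len(grid) entries (A indexes all rows at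
-- columns 0..len(grid)-1). Grids with fewer than 3 rows never index and return [].
def Pre_local_maximums (grid : List (List Int)) : Prop :=
  grid.length < 3 ∨ ∀ row ∈ grid, grid.length ≤ row.length
instance (grid : List (List Int)) : Decidable (Pre_local_maximums grid) := by unfold Pre_local_maximums; infer_instance

def pvWitness_local_maximums : List (List Int) := [[1, 2, 3], [4, 5, 6], [7, 8, 9]]

def Spec_local_maximums (grid : List (List Int)) (out : List (List Int)) : Prop := out = local_maximums_alt grid
instance (grid : List (List Int)) (out : List (List Int)) : Decidable (Spec_local_maximums grid out) := by unfold Spec_local_maximums; infer_instance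

-- ===== CLAIM (what is proved, stated in full; the proofs are below) =====
def Claim_equal_local_maximums : Prop := ∀ (grid : List (List Int)), Dom_local_maximums grid → Pre_local_maximums grid → Spec_local_maximums grid (local_maximums grid)

-- ===== LEMMAS AND PROOFS =====

-- reading the intermediate table at row a, position j-1 gives the row-wise 3-max at column j
lemma pv_horiz_lookup (grid : List (List Int)) (a j : Int)
    (ha0 : 0 ≤ a) (han : a < (grid.length : Int))
    (hj1 : 1 ≤ j) (hjn : j < (grid.length : Int) - 1) :
    pvCell (pvHoriz grid) a (j-1)
    = pvMax3 (pvCell grid a (j-1)) (pvCell grid a j) (pvCell grid a (j+1)) := by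
  unfold pvHoriz
  conv_lhs => unfold pvCell
  rw [PySem.List.pyGetD_map_pyRange_of_nonneg _ _ _ _ ha0 han]
  rw [show j - 1 = (((j-1).toNat : Nat) : Int) by omega]
  rw [PySem.List.pyGetD_map_pyRange_one _ 1 _ _ _ (by omega)]
  rw [show (1 : Int) + ((j-1).toNat : Int) = j by omega,
      show (((j-1).toNat : Nat) : Int) = j - 1 by omega]
  unfold pvCell
  rfl

lemma pv_ports_eq (grid : List (List Int)) : local_maximums grid = local_maximums_alt grid := by
  unfold local_maximums local_maximums_alt
  apply List.map_congr_left
  intro i hi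
  rw [PySem.List.mem_pyRange_one] at hi
  apply List.map_congr_left
  intro j hj
  rw [PySem.List.mem_pyRange_one] at hj
  rw [pv_horiz_lookup grid (i-1) j (by omega) (by omega) hj.1 hj.2,
      pv_horiz_lookup grid i j (by omega) (by omega) hj.1 hj.2,
      pv_horiz_lookup grid (i+1) j (by omega) (by omega) hj.1 hj.2]
  unfold pvMax3
  simp [max_assoc]

-- ===== VERDICT (by name: the statement is the Claim_ definition above) =====
theorem local_maximums_spec : Claim_equal_local_maximums := by
  intro grid _ _
  exact pv_ports_eq grid
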